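-- pv_equiv track=rewrite | github.com/epam/ai-dial-sdk | aidial_sdk/utils/merge_chunks.py | is_indexed_list
-- ===== SOURCE A (Python) =====
-- INCONSISTENT_INDEXED_LIST_ERROR_MESSAGE = (
--     "All elements of a list must be either indexed or not indexed"
-- )
--
-- def is_indexed_list(xs: list) -> bool:
--     if len(xs) == 0:
--         return False
--
--     all_indexed = True
--     any_indexed = False
--     for elem in xs:
--         if isinstance(elem, dict) and "index" in elem:
--             any_indexed = True
--         else:
--             all_indexed = False
--
--     if any_indexed and not all_indexed:
--         raise AssertionError(INCONSISTENT_INDEXED_LIST_ERROR_MESSAGE)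
--
--     return all_indexed
-- ===== SOURCE B (Python) =====
-- INCONSISTENT_INDEXED_LIST_ERROR_MESSAGE = (
--     "All elements of a list must be either indexed or not indexed"
-- )
--
--
-- def is_indexed_list(xs: list) -> bool:
--     if len(xs) == 0:
--         return False
--     flags = [isinstance(e, dict) and "index" in e for e in xs]
--     # homogeneity = every adjacent pair of flags agrees; the first element decides
--     for prev, cur in zip(flags, flags[1:]):
--         if prev != cur:
--             raise AssertionError(INCONSISTENT_INDEXED_LIST_ERROR_MESSAGE)
--     return flags[0]
-- ===== Notes on version B (the rewrite author's own statement) =====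
-- stated objective: alternative
-- what changed: B decides the result from the first element's 'indexed' flag alone and verifies consistency by comparing each adjacent pair of flags (raising at the first mismatch), instead of A's whole-list all/any boolean aggregation followed by a final check.
import Mathlib
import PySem

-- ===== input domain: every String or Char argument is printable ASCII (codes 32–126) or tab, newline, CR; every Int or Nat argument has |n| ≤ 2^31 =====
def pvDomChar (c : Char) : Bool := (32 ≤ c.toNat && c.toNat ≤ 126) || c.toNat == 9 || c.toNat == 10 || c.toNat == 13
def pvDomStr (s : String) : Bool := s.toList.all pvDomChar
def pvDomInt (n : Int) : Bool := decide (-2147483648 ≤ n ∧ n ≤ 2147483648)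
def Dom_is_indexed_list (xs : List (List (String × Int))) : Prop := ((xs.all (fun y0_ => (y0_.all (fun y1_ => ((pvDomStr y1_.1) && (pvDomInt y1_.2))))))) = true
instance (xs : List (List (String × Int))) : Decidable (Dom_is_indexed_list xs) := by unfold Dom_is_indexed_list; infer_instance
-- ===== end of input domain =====

-- B decides from the first element's flag and checks consistency by adjacent flag pairs,
-- instead of A's all/any aggregation; mixed lists (both Pythons raise) are excluded by Pre_.

-- 'isinstance(elem, dict) and "index" in elem' (elements are dicts in the Lean domain, so isinstance is True)
def pvIndexed (e : List (String × Int)) : Bool := e.any (fun kv => kv.1 == "index")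

-- ===== PORT A =====
def is_indexed_list (xs : List (List (String × Int))) : Bool :=
  if xs.length == 0 then false
  else
    -- state = (all_indexed, any_indexed)
    let st := xs.foldl
      (fun (s : Bool × Bool) e => if pvIndexed e then (s.1, true) else (false, s.2))
      (true, false)
    -- 'if any_indexed and not all_indexed: raise AssertionError' — excluded by Pre_is_indexed_list
    st.1

-- ===== PORT B =====
def is_indexed_list_alt (xs : List (List (String × Int))) : Bool :=
  if xs.length == 0 then false
  else
    let flags := xs.map pvIndexed
    -- 'for prev, cur in zip(flags, flags[1:]): if prev != cur: raise AssertionError' —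
    -- the loop only raises (on adjacent mismatch), which Pre_is_indexed_list excludes
    if (flags.zip (flags.drop 1)).any (fun pc => pc.1 != pc.2) then false  -- unreachable under Pre_
    else flags.headD false  -- flags[0]; the branch guarantees xs ≠ []

-- ===== PRECONDITION & SPEC =====
-- Pre_ excludes exactly the mixed lists (some elements indexed, some not), on which both Pythons raise AssertionError.
def Pre_is_indexed_list (xs : List (List (String × Int))) : Prop :=
  (∀ e ∈ xs, pvIndexed e = true) ∨ (∀ e ∈ xs, pvIndexed e = false)
instance (xs : List (List (String × Int))) : Decidable (Pre_is_indexed_list xs) := by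
  unfold Pre_is_indexed_list; infer_instance

def pvWitness_is_indexed_list : (List (List (String × Int))) := [[("index", 0)], [("index", 5), ("a", 1)]]

def Spec_is_indexed_list (xs : List (List (String × Int))) (out : Bool) : Prop := out = is_indexed_list_alt xs
instance (xs : List (List (String × Int))) (out : Bool) : Decidable (Spec_is_indexed_list xs out) := by unfold Spec_is_indexed_list; infer_instance

-- ===== CLAIM (what is proved, stated in full; the proofs are below) =====
def Claim_equal_is_indexed_list : Prop := ∀ (xs : List (List (String × Int))), Dom_is_indexed_list xs → Pre_is_indexed_list xs → Spec_is_indexed_list xs (is_indexed_list xs)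

-- ===== LEMMAS AND PROOFS =====

-- A's fold keeps all_indexed when every element is indexed
theorem foldA_all (xs : List (List (String × Int))) (s : Bool × Bool)
    (h : ∀ e ∈ xs, pvIndexed e = true) :
    (xs.foldl (fun (s : Bool × Bool) e => if pvIndexed e then (s.1, true) else (false, s.2)) s).1 = s.1 := by
  induction xs generalizing s with
  | nil => rfl
  | cons a t ih =>
    simp only [List.foldl_cons, h a (by simp)]
    exact ih (s.1, true) (fun e he => h e (by simp [he]))

-- A's fold forces all_indexed to false on a nonempty list with no indexed element
theorem foldA_none (xs : List (List (String × Int))) (s : Bool × Bool)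
    (h : ∀ e ∈ xs, pvIndexed e = false) (hne : xs ≠ []) :
    (xs.foldl (fun (s : Bool × Bool) e => if pvIndexed e then (s.1, true) else (false, s.2)) s).1 = false := by
  induction xs generalizing s with
  | nil => exact absurd rfl hne
  | cons a t ih =>
    simp only [List.foldl_cons, h a (by simp)]
    rcases t with _ | ⟨b, u⟩
    · rfl
    · exact ih (false, s.2) (fun e he => h e (by simp at he ⊢; tauto)) (by simp)

-- when the flags are constant, B's adjacent-pair scan finds no mismatch
theorem zip_const (xs : List (List (String × Int))) (b : Bool)
    (h : ∀ e ∈ xs, pvIndexed e = b) :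
    ((xs.map pvIndexed).zip ((xs.map pvIndexed).drop 1)).any (fun pc => pc.1 != pc.2) = false := by
  rw [List.any_eq_false]
  rintro ⟨p, c⟩ hm
  have hp := (List.of_mem_zip hm).1
  have hc := List.mem_of_mem_drop (List.of_mem_zip hm).2
  obtain ⟨e1, he1, hb1⟩ := List.mem_map.mp hp
  obtain ⟨e2, he2, hb2⟩ := List.mem_map.mp hc
  simp [← hb1, ← hb2, h e1 he1, h e2 he2]

-- ===== VERDICT (by name: the statement is the Claim_ definition above) =====
theorem is_indexed_list_spec : Claim_equal_is_indexed_list := by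
  intro xs _ hpre
  unfold Spec_is_indexed_list is_indexed_list is_indexed_list_alt
  rcases xs with _ | ⟨a, t⟩
  · rfl
  · simp only [List.length_cons, beq_iff_eq, Nat.succ_ne_zero, if_false]
    rcases hpre with hall | hnone
    · rw [zip_const _ true hall, if_neg (by simp), foldA_all _ _ hall]
      simp [hall a (by simp)]
    · rw [zip_const _ false hnone, if_neg (by simp), foldA_none _ _ hnone (by simp)]
      simp [hnone a (by simp)]
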